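-- pv_equiv track=rewrite | github.com/kimnamjun/ITWILL-Python2 | test/skill check lv2.py | solution
-- ===== SOURCE A (Python) =====
-- def solution(stones, k):
--     answer = 0
--     stones_values = sorted(list(set(stones)))
--     left = 0
--     right = len(stones_values) - 1
--
--     yes = 0
--     no = len(stones_values)
--
--     cnt = 0
--     while cnt < 100:
--         cnt += 1
--
--         mid = (left + right) // 2
--         stones2 = [s - stones_values[mid] for s in stones]
--
--         length = 0
--         max_length = 0
--         for s in stones2:
--             if s < 0:
--                 length += 1
--             elif length != 0:
--                 max_length = max(max_length, length)
--                 length = 0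
--         max_length = max(max_length, length)
--         if max_length >= k:
--             no = mid
--             right = mid - 1
--         else:
--             yes = mid
--             left = mid + 1
--         if no - yes == 1:
--             return yes
--
--
--     return answer
-- ===== SOURCE B (Python) =====
-- def solution(stones, k):
--     # Count the distinct stone values whose longest run of strictly smaller
--     # stones is shorter than k; the answer is that count minus one.
--     vals = sorted(set(stones))
--     count = 0
--     for v in vals:
--         run = 0
--         best = 0
--         for s in stones:
--             run = run + 1 if s < v else 0
--             if run > best:
--                 best = run
--         if best < k:
--             count += 1
--     return count - 1
-- ===== Notes on version B (the rewrite author's own statement) =====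
-- stated objective: alternative
-- what changed: Replaces A's fuel-bounded binary search over the sorted distinct stone values (recomputing the max-run test at each probed midpoint, with left/right/yes/no bookkeeping) by a direct linear count: B counts the distinct values whose longest run of strictly smaller stones is below k and returns that count minus one.
-- outside the precondition, e.g. on solution([3], -3): A returns 0, B returns -1; on solution([0, 1], -1): A returns 0, B returns -1; on solution([], 0): A returns 0, B returns -1
import Mathlib
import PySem

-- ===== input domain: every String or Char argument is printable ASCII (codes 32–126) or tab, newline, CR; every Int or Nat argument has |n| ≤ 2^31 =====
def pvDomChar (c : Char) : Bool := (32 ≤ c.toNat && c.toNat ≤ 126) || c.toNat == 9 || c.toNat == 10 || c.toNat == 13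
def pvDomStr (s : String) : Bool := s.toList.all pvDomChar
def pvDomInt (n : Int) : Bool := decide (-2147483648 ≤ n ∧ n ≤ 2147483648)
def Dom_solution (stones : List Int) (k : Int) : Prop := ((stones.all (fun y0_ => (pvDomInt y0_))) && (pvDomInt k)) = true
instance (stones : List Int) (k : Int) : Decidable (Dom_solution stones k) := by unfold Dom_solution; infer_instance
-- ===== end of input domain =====

-- B replaces A's fuel-bounded binary search over the sorted distinct values by a direct linear
-- count of the distinct values whose longest run of strictly smaller stones is below k
-- (an alternative algorithm of different structure; not faster).

-- ===== PORT A =====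
-- A's inner for-loop over stones2: state (length, max_length)
def pvScanA (stones2 : List Int) : Int × Int :=
  stones2.foldl (fun st s =>
    if s < 0 then (st.1 + 1, st.2)
    else if st.1 ≠ 0 then (0, max st.2 st.1)
    else st) (0, 0)

-- A's 'while cnt < 100' loop; state (left, right, yes, no); fuel exhaustion returns answer = 0.
-- stones_values[mid] sits inside the comprehension over stones, so Python evaluates it only when
-- stones ≠ [] — and then vals ≠ [] and mid ∈ [-1, len-1], so pyGetD's default is never used.
def pvLoopA (stones vals : List Int) (k : Int) : Nat → Int → Int → Int → Int → Int
  | 0, _, _, _, _ => 0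
  | fuel + 1, left, right, yes, no =>
    let mid := PySem.Int.floordiv (left + right) 2
    let stones2 := stones.map (fun s => s - PySem.List.pyGetD vals mid 0)
    let st := pvScanA stones2
    let maxLength := max st.2 st.1
    if maxLength ≥ k then
      -- no := mid; right := mid - 1; then 'if no - yes == 1: return yes'
      if mid - yes = 1 then yes
      else pvLoopA stones vals k fuel left (mid - 1) yes mid
    else
      -- yes := mid; left := mid + 1; then 'if no - yes == 1: return yes'
      if no - mid = 1 then mid
      else pvLoopA stones vals k fuel (mid + 1) right mid no

def solution (stones : List Int) (k : Int) : Int :=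
  let vals := PySem.List.sorted (PySem.Set.ofList stones) (fun x => x) false
  pvLoopA stones vals k 100 0 ((vals.length : Int) - 1) 0 (vals.length : Int)

-- ===== PORT B =====
-- B's inner pass: longest run of stones strictly below v (state (run, best))
def pvMaxRun (stones : List Int) (v : Int) : Int :=
  (stones.foldl (fun st s =>
    let run := if s < v then st.1 + 1 else 0
    (run, max st.2 run)) ((0 : Int), (0 : Int))).2

def solution_alt (stones : List Int) (k : Int) : Int :=
  let vals := PySem.List.sorted (PySem.Set.ofList stones) (fun x => x) false
  (vals.foldl (fun c v => if pvMaxRun stones v < k then c + 1 else c) (0 : Int)) - 1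

-- ===== PRECONDITION & SPEC =====
-- Pre_ excludes the non-positive thresholds k ≤ 0, a degenerate corner outside the task's
-- natural domain on which the run-length question is vacuous and A's 0 (its initial
-- yes/answer value) and B's -1 ('no qualifying value') are equally arbitrary answers.
def Pre_solution (stones : List Int) (k : Int) : Prop := 1 ≤ k
instance (stones : List Int) (k : Int) : Decidable (Pre_solution stones k) := by unfold Pre_solution; infer_instance
def pvWitness_solution : List Int × Int := ([2, 4, 5, 3], 3)

def Spec_solution (stones : List Int) (k : Int) (out : Int) : Prop := out = solution_alt stones k
instance (stones : List Int) (k : Int) (out : Int) : Decidable (Spec_solution stones k out) := by unfold Spec_solution; infer_instance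

-- ===== CLAIM (what is proved, stated in full; the proofs are below) =====
def Claim_equal_solution : Prop := ∀ (stones : List Int) (k : Int), Dom_solution stones k → Pre_solution stones k → Spec_solution stones k (solution stones k)


-- ===== LEMMAS AND PROOFS =====

-- A's scan of the (· - v)-shifted stones, started at (l, ml), tracks B's run/best scan:
-- same current run, and A's pending 'max max_length length' equals B's running best.
lemma pv_scan_rel (v : Int) : ∀ (xs : List Int) (l ml : Int), 0 ≤ l → 0 ≤ ml →
    ((xs.map (fun s => s - v)).foldl (fun st s =>
        if s < 0 then (st.1 + 1, st.2)
        else if st.1 ≠ 0 then (0, max st.2 st.1)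
        else st) (l, ml)).1
      = (xs.foldl (fun st s =>
          let run := if s < v then st.1 + 1 else 0
          (run, max st.2 run)) (l, max ml l)).1
    ∧ max ((xs.map (fun s => s - v)).foldl (fun st s =>
        if s < 0 then (st.1 + 1, st.2)
        else if st.1 ≠ 0 then (0, max st.2 st.1)
        else st) (l, ml)).2
        ((xs.map (fun s => s - v)).foldl (fun st s =>
        if s < 0 then (st.1 + 1, st.2)
        else if st.1 ≠ 0 then (0, max st.2 st.1)
        else st) (l, ml)).1
      = (xs.foldl (fun st s =>
          let run := if s < v then st.1 + 1 else 0
          (run, max st.2 run)) (l, max ml l)).2 := by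
  intro xs
  induction xs with
  | nil => intro l ml hl hml; constructor <;> simp
  | cons x t ih =>
    intro l ml hl hml
    simp only [List.map_cons, List.foldl_cons]
    by_cases hx : x < v
    · rw [if_pos (by omega : x - v < 0)]
      simp only [if_pos hx]
      have h1 : max (max ml l) (l + 1) = max ml (l + 1) := by omega
      rw [h1]
      exact ih (l + 1) ml (by omega) hml
    · rw [if_neg (by omega : ¬ x - v < 0)]
      simp only [if_neg hx]
      by_cases hl0 : l = 0
      · subst hl0
        rw [if_neg (by simp)]
        have h1 : max (max ml 0) 0 = max ml 0 := by omega
        rw [h1]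
        exact ih 0 ml (le_refl 0) hml
      · rw [if_pos (by simpa using hl0)]
        have h1 : max (max ml l) 0 = max (max ml l) 0 := rfl
        have h2 : (0:Int) ≤ max ml l := by omega
        have h3 : max (max ml l) 0 = max ml l := by omega
        rw [h3]
        have := ih 0 (max ml l) (le_refl 0) h2
        rwa [show max (max ml l) 0 = max ml l by omega] at this

-- the per-iteration test A computes equals B's pvMaxRun
lemma pv_maxLength_eq (stones : List Int) (v : Int) :
    max (pvScanA (stones.map (fun s => s - v))).2 (pvScanA (stones.map (fun s => s - v))).1
      = pvMaxRun stones v := by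
  have h := (pv_scan_rel v stones 0 0 (le_refl 0) (le_refl 0)).2
  simpa [pvScanA, pvMaxRun] using h

lemma pv_maxRun_mono_aux (v w : Int) (h : v ≤ w) : ∀ (xs : List Int) (r1 b1 r2 b2 : Int),
    0 ≤ r1 → r1 ≤ r2 → b1 ≤ b2 →
    (0 ≤ (xs.foldl (fun st s =>
          let run := if s < v then st.1 + 1 else 0
          (run, max st.2 run)) (r1, b1)).1
     ∧ (xs.foldl (fun st s =>
          let run := if s < v then st.1 + 1 else 0
          (run, max st.2 run)) (r1, b1)).1
        ≤ (xs.foldl (fun st s =>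
          let run := if s < w then st.1 + 1 else 0
          (run, max st.2 run)) (r2, b2)).1)
    ∧ (xs.foldl (fun st s =>
          let run := if s < v then st.1 + 1 else 0
          (run, max st.2 run)) (r1, b1)).2
        ≤ (xs.foldl (fun st s =>
          let run := if s < w then st.1 + 1 else 0
          (run, max st.2 run)) (r2, b2)).2 := by
  intro xs
  induction xs with
  | nil => intro r1 b1 r2 b2 h1 h2 h3; exact ⟨⟨h1, h2⟩, h3⟩
  | cons x t ih =>
    intro r1 b1 r2 b2 h1 h2 h3
    simp only [List.foldl_cons]
    by_cases hxv : x < v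
    · rw [if_pos hxv, if_pos (lt_of_lt_of_le hxv h)]
      exact ih (r1 + 1) (max b1 (r1 + 1)) (r2 + 1) (max b2 (r2 + 1)) (by omega) (by omega) (by omega)
    · rw [if_neg hxv]
      by_cases hxw : x < w
      · rw [if_pos hxw]
        exact ih 0 (max b1 0) (r2 + 1) (max b2 (r2 + 1)) (le_refl 0) (by omega) (by omega)
      · rw [if_neg hxw]
        exact ih 0 (max b1 0) 0 (max b2 0) (le_refl 0) (le_refl 0) (by omega)

lemma pv_maxRun_mono (stones : List Int) {v w : Int} (h : v ≤ w) :
    pvMaxRun stones v ≤ pvMaxRun stones w := by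
  have := (pv_maxRun_mono_aux v w h stones 0 0 0 0 (le_refl 0) (le_refl 0) (le_refl 0)).2
  simpa [pvMaxRun] using this

lemma pv_maxRun_zero_aux (v : Int) : ∀ (xs : List Int) (b : Int), 0 ≤ b →
    (∀ s ∈ xs, ¬ s < v) →
    xs.foldl (fun st s =>
      let run := if s < v then st.1 + 1 else 0
      (run, max st.2 run)) ((0 : Int), b) = (0, b) := by
  intro xs
  induction xs with
  | nil => intro b hb hall; rfl
  | cons x t ih =>
    intro b hb hall
    simp only [List.foldl_cons]
    rw [if_neg (hall x (by simp))]
    rw [show max b (0:Int) = b by omega]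
    exact ih b hb (fun s hs => hall s (by simp [hs]))

-- the smallest distinct value has no stone strictly below it, so its max run is 0
lemma pv_maxRun_zero (stones : List Int) (v : Int) (h : ∀ s ∈ stones, ¬ s < v) :
    pvMaxRun stones v = 0 := by
  unfold pvMaxRun
  rw [pv_maxRun_zero_aux v stones 0 (le_refl 0) h]

-- along a strictly increasing list of values, the test 'k ≤ maxrun' is false exactly on the
-- first countP-many entries
lemma pv_count_char (stones : List Int) (k : Int) : ∀ (L : List Int), L.Pairwise (· < ·) →
    ∀ i : Nat, i < L.length →
      ((k ≤ pvMaxRun stones (L.getD i 0)) ↔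
        ((L.countP (fun v => decide (pvMaxRun stones v < k)) : Int) ≤ (i : Int))) := by
  intro L
  induction L with
  | nil => intro _ i hi; simp at hi
  | cons x t ih =>
    intro hpw i hi
    have hx : ∀ y ∈ t, x < y := fun y hy => (List.pairwise_cons.mp hpw).1 y hy
    have ht : t.Pairwise (· < ·) := (List.pairwise_cons.mp hpw).2
    by_cases hcx : k ≤ pvMaxRun stones x
    · have hall : ∀ y ∈ x :: t, k ≤ pvMaxRun stones y := by
        intro y hy
        rcases List.mem_cons.mp hy with rfl | hy
        · exact hcx
        · exact le_trans hcx (pv_maxRun_mono stones (le_of_lt (hx y hy)))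
      have hcnt : (x :: t).countP (fun v => decide (pvMaxRun stones v < k)) = 0 := by
        rw [List.countP_eq_zero]
        intro a ha
        simpa using not_lt.mpr (hall a ha)
      rw [hcnt]
      have hmem : (x :: t).getD i 0 ∈ x :: t := by
        rw [List.getD_eq_getElem _ _ hi]
        exact List.getElem_mem _
      exact iff_of_true (hall _ hmem) (by positivity)
    · have hcnt : (x :: t).countP (fun v => decide (pvMaxRun stones v < k))
          = t.countP (fun v => decide (pvMaxRun stones v < k)) + 1 := by
        rw [List.countP_cons_of_pos]
        simpa using not_le.mp hcx
      rw [hcnt]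
      cases i with
      | zero =>
        simp only [List.getD_cons_zero]
        constructor
        · intro hcontr; exact absurd hcontr hcx
        · intro hcontr
          exfalso
          have : (0:Int) ≤ (t.countP (fun v => decide (pvMaxRun stones v < k)) : Int) := by positivity
          omega
      | succ j =>
        simp only [List.getD_cons_succ]
        have hj : j < t.length := by simpa [List.length_cons, Nat.succ_lt_succ_iff] using hi
        have := ih ht j hj
        rw [this]
        push_cast
        omega

-- one unfolding of A's loop, with the scan replaced by pvMaxRun
lemma pv_loop_succ (stones vals : List Int) (k : Int) (fuel : Nat) (left right yes no : Int) :
    pvLoopA stones vals k (fuel + 1) left right yes no =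
      (if k ≤ pvMaxRun stones (PySem.List.pyGetD vals (PySem.Int.floordiv (left + right) 2) 0)
       then (if (PySem.Int.floordiv (left + right) 2) - yes = 1 then yes
             else pvLoopA stones vals k fuel left ((PySem.Int.floordiv (left + right) 2) - 1) yes
                    (PySem.Int.floordiv (left + right) 2))
       else (if no - (PySem.Int.floordiv (left + right) 2) = 1
             then (PySem.Int.floordiv (left + right) 2)
             else pvLoopA stones vals k fuel ((PySem.Int.floordiv (left + right) 2) + 1) right
                    (PySem.Int.floordiv (left + right) 2) no)) := by
  conv_lhs => rw [pvLoopA]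
  simp only [ge_iff_le, pv_maxLength_eq]

-- the bisection loop, run on a characterised monotone test, returns C - 1
lemma pv_loop_eq (stones vals : List Int) (k C : Int)
    (hchar : ∀ i : Nat, i < vals.length →
      ((k ≤ pvMaxRun stones (vals.getD i 0)) ↔ C ≤ (i : Int))) :
    ∀ (fuel : Nat) (left right yes no : Int),
      right = no - 1 → 0 ≤ left → no ≤ (vals.length : Int) →
      (left = yes + 1 ∨ (yes = 0 ∧ left = 0)) →
      yes < C → C ≤ no → 1 ≤ no - left → no - left < 2 ^ fuel →
      pvLoopA stones vals k fuel left right yes no = C - 1 := by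
  intro fuel
  induction fuel with
  | zero =>
    intro left right yes no h1 h2 h3 h4 h5 h6 h7 h8
    exfalso
    rw [pow_zero] at h8
    omega
  | succ f ih =>
    intro left right yes no h1 h2 h3 h4 h5 h6 h7 h8
    rw [pv_loop_succ]
    set mid := PySem.Int.floordiv (left + right) 2 with hmiddef
    have hlr : left ≤ right := by omega
    have hmb := PySem.Int.floordiv_two_mid_bounds hlr
    have h2m : 2 * mid ≤ left + right ∧ left + right - 1 ≤ 2 * mid := by
      have hdm := PySem.Int.floordiv_mul_add_mod (left + right) 2
      have hm0 := PySem.Int.mod_nonneg (left + right) (by norm_num : (0:Int) < 2)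
      have hm1 := PySem.Int.mod_lt (left + right) (by norm_num : (0:Int) < 2)
      omega
    have hmid0 : 0 ≤ mid := le_trans h2 hmb.1
    have hmidlen : mid < (vals.length : Int) := by omega
    have hmn : ((mid.toNat : Nat) : Int) = mid := Int.toNat_of_nonneg hmid0
    have hmn2 : mid.toNat < vals.length := by
      have : ((mid.toNat : Nat) : Int) < (vals.length : Int) := by rw [hmn]; exact hmidlen
      exact_mod_cast this
    have hq := hchar mid.toNat hmn2
    rw [hmn] at hq
    rw [show PySem.List.pyGetD vals mid 0 = vals.getD mid.toNat 0 by
      rw [← hmn, PySem.List.pyGetD_natCast]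
      simp
      rw [show max mid 0 = mid from by omega]]
    have hpow : (2:Int) ^ (f + 1) = 2 * 2 ^ f := by ring
    by_cases hk : k ≤ pvMaxRun stones (vals.getD mid.toNat 0)
    · rw [if_pos hk]
      have hCm : C ≤ mid := hq.mp hk
      by_cases hr : mid - yes = 1
      · rw [if_pos hr]; omega
      · rw [if_neg hr]
        have hgap : 1 ≤ mid - left := by rcases h4 with h4 | ⟨hy, hl⟩ <;> omega
        apply ih left (mid - 1) yes mid rfl h2 (by omega) h4 h5 hCm hgap
        have h2g : 2 * (mid - left) ≤ no - left := by omega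
        rw [hpow] at h8
        linarith
    · rw [if_neg hk]
      have hCm : ¬ C ≤ mid := fun hcontr => hk (hq.mpr hcontr)
      by_cases hr : no - mid = 1
      · rw [if_pos hr]; omega
      · rw [if_neg hr]
        apply ih (mid + 1) right mid no (by omega) (by omega) h3 (Or.inl rfl) (by omega) h6
          (by omega)
        have h2g : 2 * (no - mid - 1) ≤ no - left := by omega
        rw [hpow] at h8
        linarith

-- a strictly increasing list of 32-bit-bounded ints is far shorter than 2^100
lemma pv_len_bound (L : List Int) (hpw : L.Pairwise (· < ·))
    (hb : ∀ v ∈ L, -2147483648 ≤ v ∧ v ≤ 2147483648) : (L.length : Int) < 2 ^ 100 := by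
  have hnd : L.Nodup := hpw.imp (fun h => ne_of_lt h)
  have hsub : L.toFinset ⊆ Finset.Icc (-2147483648 : Int) 2147483648 := by
    intro v hv
    rw [List.mem_toFinset] at hv
    rw [Finset.mem_Icc]
    exact hb v hv
  have hcard := Finset.card_le_card hsub
  rw [List.toFinset_card_of_nodup hnd, Int.card_Icc] at hcard
  have : L.length ≤ 4294967297 := by
    have h2 : ((2147483648 : Int) + 1 - (-2147483648)).toNat = 4294967297 := by decide
    omega
  have : (L.length : Int) ≤ 4294967297 := by exact_mod_cast this
  have hlt : (4294967297 : Int) < 2 ^ 100 := by norm_num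
  omega

-- ===== VERDICT (by name: the statement is the Claim_ definition above) =====
theorem solution_spec : Claim_equal_solution := by
  intro stones k hdom hpre
  unfold Pre_solution at hpre
  have hk1 : 1 ≤ k := hpre
  unfold Spec_solution
  by_cases hs : stones = []
  · subst hs
    have hnil : (PySem.List.sorted (PySem.Set.ofList ([] : List Int)) (fun x => x) false) = [] := rfl
    simp only [solution, solution_alt, hnil, List.length_nil, List.foldl_nil]
    norm_num
    rw [show (100 : Nat) = 99 + 1 from rfl, pv_loop_succ]
    rw [show PySem.Int.floordiv (0 + -1) 2 = -1 from by decide]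
    rw [show pvMaxRun [] (PySem.List.pyGetD ([] : List Int) (-1) 0) = 0 from rfl]
    rw [if_neg (by omega), if_pos (by norm_num)]
  · simp only [solution, solution_alt]
    set vals := PySem.List.sorted (PySem.Set.ofList stones) (fun x => x) false with hvals
    have hpw : vals.Pairwise (· < ·) := PySem.List.sorted_ofList_pairwise_lt stones
    have hmem : ∀ v, v ∈ vals ↔ v ∈ stones := by
      intro v
      rw [hvals, PySem.List.mem_sorted, PySem.Set.mem_ofList]
    have hvne : vals ≠ [] := by
      obtain ⟨x, hx⟩ := List.exists_mem_of_ne_nil stones hs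
      exact List.ne_nil_of_mem ((hmem x).mpr hx)
    set C : Int := (vals.countP (fun v => decide (pvMaxRun stones v < k)) : Int) with hCdef
    have hchar := pv_count_char stones k vals hpw
    have hC1 : 1 ≤ C := by
      obtain ⟨m, t, hmt⟩ := List.exists_cons_of_ne_nil hvne
      have hmin : ∀ s ∈ stones, m ≤ s := by
        intro s hsm
        have hh := PySem.List.key_head_sorted_le (PySem.Set.ofList stones) (fun x => x) (hvals.symm.trans hmt)
        exact hh s ((PySem.Set.mem_ofList stones s).mpr hsm)
      have h0 : pvMaxRun stones m = 0 :=
        pv_maxRun_zero stones m (fun s hsm => not_lt.mpr (hmin s hsm))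
      have hcnt : vals.countP (fun v => decide (pvMaxRun stones v < k))
          = t.countP (fun v => decide (pvMaxRun stones v < k)) + 1 := by
        rw [hmt, List.countP_cons_of_pos]
        simp [h0]
        omega
      rw [hCdef, hcnt]
      push_cast
      omega
    have hClen : C ≤ (vals.length : Int) := by
      have := List.countP_le_length (p := fun v => decide (pvMaxRun stones v < k)) (l := vals)
      rw [hCdef]
      exact_mod_cast this
    have hbounds : ∀ v ∈ vals, -2147483648 ≤ v ∧ v ≤ 2147483648 := by
      intro v hv
      have hvst := (hmem v).mp hv
      unfold Dom_solution at hdom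
      simp only [Bool.and_eq_true, List.all_eq_true] at hdom
      have := hdom.1 v hvst
      simpa [pvDomInt] using this
    have hlen : (vals.length : Int) < 2 ^ 100 := pv_len_bound vals hpw hbounds
    have hlen1 : 1 ≤ (vals.length : Int) := by
      have : 0 < vals.length := List.length_pos_of_ne_nil hvne
      exact_mod_cast this
    have hres := pv_loop_eq stones vals k C hchar 100 0 ((vals.length : Int) - 1) 0
      (vals.length : Int) rfl (le_refl 0) (le_refl _) (Or.inr ⟨rfl, rfl⟩) (by omega) hClen
      (by omega) (by omega)
    rw [hres]
    rw [PySem.List.foldl_ite_add_one]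
    rw [hCdef]
    omega
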